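-- pv_equiv track=rewrite | github.com/Danieltech99/CS-222-Final-Project | algorithms/connected_components.py | subGraphs
-- ===== SOURCE A (Python) =====
-- def DFSUtil(graph, temp, v, visited):
--
--     # Mark the current vertex as visited
--     visited[v] = True
--
--     # Store the vertex to list
--     temp.append(v)
--
--     # Repeat for all vertices adjacent
--     # to this vertex v
--     for i,w in enumerate(graph[v]):
--         if w > 0:
--             if visited[i] == False:
--
--                 # Update the list
--                 temp = DFSUtil(graph, temp, i, visited)
--     return temp
--
-- def connectedComponents(graph):
--     visited = []
--     cc = []
--     for i in range(len(graph)):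
--         visited.append(False)
--     for v in range(len(graph)):
--         if visited[v] == False:
--             temp = []
--             cc.append(DFSUtil(graph, temp, v, visited))
--     return cc
--
-- def subGraphs(graph):
--     comps = connectedComponents(graph)
--     sub_graphs = []
--     for c in comps:
--         component = sorted(c)
--         map = {i:n for i,n in enumerate(component)}
--         sub_g = []
--         for u in range(len(component)):
--             row = []
--             for v in range(len(component)):
--                 row.append(None)
--             sub_g.append(row)
--         for u_new,u in enumerate(component):
--             for v_new,v in enumerate(component):
--                 sub_g[u_new][v_new] = graph[u][v]
--         sub_graphs.append((map,sub_g))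
--     return sub_graphs
-- ===== SOURCE B (Python) =====
-- def subGraphs(graph):
--     n = len(graph)
--     visited = [False] * n
--     out = []
--     for s in range(n):
--         if visited[s]:
--             continue
--         comp = []
--         stack = [s]
--         while stack:
--             v = stack.pop()
--             if visited[v]:
--                 continue
--             visited[v] = True
--             comp.append(v)
--             stack.extend(i for i, w in reversed(list(enumerate(graph[v]))) if w > 0)
--         component = sorted(comp)
--         mp = {i: x for i, x in enumerate(component)}
--         sub = [[graph[u][w] for w in component] for u in component]
--         out.append((mp, sub))
--     return out
-- ===== Notes on version B (the rewrite author's own statement) =====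
-- stated objective: alternative
-- what changed: The recursive DFS helper with a separate components pass is replaced by an explicit-stack traversal fused into a single loop that builds each (index-map, submatrix) entry inline with comprehension-style maps instead of allocate-then-assign fills.
import Mathlib
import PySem

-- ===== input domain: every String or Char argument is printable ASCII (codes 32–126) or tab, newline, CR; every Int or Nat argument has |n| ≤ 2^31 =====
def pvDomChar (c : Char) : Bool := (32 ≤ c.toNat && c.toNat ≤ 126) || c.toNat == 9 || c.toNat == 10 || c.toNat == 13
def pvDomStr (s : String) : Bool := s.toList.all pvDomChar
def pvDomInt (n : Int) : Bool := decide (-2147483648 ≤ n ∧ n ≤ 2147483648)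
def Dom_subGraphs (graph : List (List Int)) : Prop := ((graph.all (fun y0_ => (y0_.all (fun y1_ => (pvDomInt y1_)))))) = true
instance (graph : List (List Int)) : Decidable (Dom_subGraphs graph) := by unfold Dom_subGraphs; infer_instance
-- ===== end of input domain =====

-- B replaces the recursive DFS helper by an explicit-stack traversal fused into a single
-- output-building pass (objective: alternative decomposition, same asymptotic cost).
-- Python A mutates `visited`/`temp` in place; both ports thread that state functionally —
-- the equivalence proved here is about the return value (neither Python mutates its argument).

-- ===== PORT A =====
-- DFSUtil: the recursion is given fuel (its depth is bounded by the number of unvisited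
-- vertices, so the fuel `graph.length + 1` supplied below never runs out on square input);
-- `visited` is returned alongside `temp` because Python mutates it in place.
def DFSUtil (graph : List (List Int)) : Nat → List Int → Int → List Bool → List Int × List Bool
  | 0, temp, _, visited => (temp, visited)
  | fuel+1, temp, v, visited =>
      (PySem.List.enumerate (PySem.List.pyGetD graph v []) 0).foldl
        (fun s iw =>
          if iw.2 > 0 then
            if PySem.List.pyGetD s.2 iw.1 false = false then
              DFSUtil graph fuel s.1 iw.1 s.2
            else s
          else s)
        (temp ++ [v], PySem.List.pySetD visited v true)

def connectedComponents (graph : List (List Int)) : List (List Int) :=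
  let visited := (PySem.List.pyRange 0 (graph.length : Int) 1).foldl (fun vs _ => vs ++ [false]) []
  ((PySem.List.pyRange 0 (graph.length : Int) 1).foldl
      (fun (s : List (List Int) × List Bool) v =>
        if PySem.List.pyGetD s.2 v false = false then
          let r := DFSUtil graph (graph.length + 1) [] v s.2
          (s.1 ++ [r.1], r.2)
        else s)
      ([], visited)).1

def subGraphs (graph : List (List Int)) : List ((List (Int × Int)) × List (List Int)) :=
  (connectedComponents graph).foldl
    (fun acc c =>
      let component := PySem.List.sorted c (fun x => x) false
      -- {i:n for i,n in enumerate(component)}: fresh keys inserted in order = the enumerate list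
      let map := PySem.List.enumerate component 0
      -- Python fills the matrix with None and overwrites every cell below; 0 is the placeholder
      let sub0 := (PySem.List.pyRange 0 (component.length : Int) 1).foldl
          (fun sg _ => sg ++
            [(PySem.List.pyRange 0 (component.length : Int) 1).foldl (fun r _ => r ++ [(0 : Int)]) []]) []
      let sub := (PySem.List.enumerate component 0).foldl
          (fun sg uu =>
            (PySem.List.enumerate component 0).foldl
              (fun sg vv =>
                PySem.List.pySetD sg uu.1
                  (PySem.List.pySetD (PySem.List.pyGetD sg uu.1 []) vv.1
                    (PySem.List.pyGetD (PySem.List.pyGetD graph uu.2 []) vv.2 0)))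
              sg)
          sub0
      acc ++ [(map, sub)])
    []

-- ===== PORT B =====
-- stackDFS: the Lean list holds the Python stack back to front (Python pops from the end
-- and pushes the positive neighbours reversed, so the vertex popped next is the head here).
-- The loop is given fuel; the count of iterations is bounded by n*n + n + 1 on square input.
def stackDFS (graph : List (List Int)) : Nat → List Int → List Int → List Bool → List Int × List Bool
  | 0, _, temp, visited => (temp, visited)
  | _+1, [], temp, visited => (temp, visited)
  | fuel+1, v :: st, temp, visited =>
      if PySem.List.pyGetD visited v false then stackDFS graph fuel st temp visited
      else
        stackDFS graph fuel
          (((PySem.List.enumerate (PySem.List.pyGetD graph v []) 0).filterMap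
              (fun iw => if iw.2 > 0 then some iw.1 else none)) ++ st)
          (temp ++ [v]) (PySem.List.pySetD visited v true)

def subGraphs_alt (graph : List (List Int)) : List ((List (Int × Int)) × List (List Int)) :=
  ((PySem.List.pyRange 0 (graph.length : Int) 1).foldl
      (fun (s : List ((List (Int × Int)) × List (List Int)) × List Bool) v =>
        if PySem.List.pyGetD s.2 v false then s
        else
          let r := stackDFS graph (graph.length * graph.length + graph.length + 1) [v] [] s.2
          let component := PySem.List.sorted r.1 (fun x => x) false
          (s.1 ++ [(PySem.List.enumerate component 0,
                    component.map (fun u => component.map (fun w =>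
                      PySem.List.pyGetD (PySem.List.pyGetD graph u []) w 0)))],
           r.2))
      ([], List.replicate graph.length false)).1

-- ===== PRECONDITION & SPEC =====
-- Pre_ restricts to square matrices (every row as long as the matrix) — the natural
-- adjacency-matrix domain: on ragged input A typically raises IndexError (visited/graph
-- indexed past a row's end), so the claim does not cover ragged inputs even where A
-- happens to return.
def Pre_subGraphs (graph : List (List Int)) : Prop :=
  ∀ row ∈ graph, row.length = graph.length
instance (graph : List (List Int)) : Decidable (Pre_subGraphs graph) := by
  unfold Pre_subGraphs; infer_instance

def pvWitness_subGraphs : List (List Int) := [[0, 1, 0], [0, 0, 2], [0, 0, 0]]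

def Spec_subGraphs (graph : List (List Int)) (out : List ((List (Int × Int)) × List (List Int))) : Prop := out = subGraphs_alt graph
instance (graph : List (List Int)) (out : List ((List (Int × Int)) × List (List Int))) : Decidable (Spec_subGraphs graph out) := by unfold Spec_subGraphs; infer_instance

-- ===== CLAIM (what is proved, stated in full; the proofs are below) =====
def Claim_equal_subGraphs : Prop := ∀ (graph : List (List Int)), Dom_subGraphs graph → Pre_subGraphs graph → Spec_subGraphs graph (subGraphs graph)

-- ===== LEMMAS AND PROOFS =====

-- The canonical A-side step: visit v if it is unvisited (fuel = the count of unvisited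
-- entries, which the lemmas below show is always enough).
def dfsStep (graph : List (List Int)) (s : List Int × List Bool) (v : Int) : List Int × List Bool :=
  if PySem.List.pyGetD s.2 v false then s
  else DFSUtil graph (s.2.count false) s.1 v s.2

def gstep (graph : List (List Int)) (s : List Int × List Bool) (iw : Int × Int) : List Int × List Bool :=
  if iw.2 > 0 then dfsStep graph s iw.1 else s

-- the per-component transform shared by both ports (B's comprehension shape)
def transB (graph : List (List Int)) (c : List Int) : (List (Int × Int)) × List (List Int) :=
  let component := PySem.List.sorted c (fun x => x) false
  (PySem.List.enumerate component 0,
   component.map (fun u => component.map (fun w =>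
     PySem.List.pyGetD (PySem.List.pyGetD graph u []) w 0)))

-- named copies of the two loop bodies (definitionally the ports' lambdas)
def stepA (graph : List (List Int)) (s : List (List Int) × List Bool) (v : Int) :
    List (List Int) × List Bool :=
  if PySem.List.pyGetD s.2 v false = false then
    let r := DFSUtil graph (graph.length + 1) [] v s.2
    (s.1 ++ [r.1], r.2)
  else s

def stepB (graph : List (List Int))
    (s : List ((List (Int × Int)) × List (List Int)) × List Bool) (v : Int) :
    List ((List (Int × Int)) × List (List Int)) × List Bool :=
  if PySem.List.pyGetD s.2 v false then s
  else
    let r := stackDFS graph (graph.length * graph.length + graph.length + 1) [v] [] s.2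
    (s.1 ++ [transB graph r.1], r.2)

-- generic facts --------------------------------------------------------------

lemma foldl_const_append {α β : Type} (x : α) :
    ∀ (l : List β) (a : List α), l.foldl (fun vs _ => vs ++ [x]) a = a ++ List.replicate l.length x := by
  intro l
  induction l with
  | nil => simp
  | cons b l ih =>
      intro a
      simp [List.foldl_cons, ih, List.replicate_succ]

lemma count_false_set_true (l : List Bool) (n : Nat) (h : n < l.length) (hf : l[n] = false) :
    (l.set n true).count false + 1 = l.count false := by
  induction l generalizing n with
  | nil => simp at h
  | cons b l ih =>
      cases n with
      | zero => simp_all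
      | succ n =>
          simp only [List.set_cons_succ, List.count_cons]
          have := ih n (by simpa using h) (by simpa using hf)
          omega

lemma foldl_congr_inv {α β : Type} (I : α → Prop) (f h : α → β → α) :
    ∀ (l : List β) (s : α), I s → (∀ s b, I s → b ∈ l → f s b = h s b ∧ I (h s b)) →
      l.foldl f s = l.foldl h s ∧ I (l.foldl h s) := by
  intro l
  induction l with
  | nil => intro s hs _; exact ⟨rfl, hs⟩
  | cons b l ih =>
      intro s hs hfh
      obtain ⟨heq, hI⟩ := hfh s b hs (by simp)
      simp only [List.foldl_cons, heq]
      exact ih (h s b) hI (fun s' b' hI' hb' => hfh s' b' hI' (by simp [hb']))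

lemma fold_set_enum {α : Type} (f : Int → α) :
    ∀ (l : List Int) (s : Nat) (row0 : List α), s + l.length ≤ row0.length →
      (PySem.List.enumerate l (s : Int)).foldl
          (fun r p => PySem.List.pySetD r p.1 (f p.2)) row0
        = row0.take s ++ l.map f ++ row0.drop (s + l.length) := by
  intro l
  induction l with
  | nil =>
      intro s row0 h
      simp [PySem.List.enumerate_nil, List.take_append_drop]
  | cons x l ih =>
      intro s row0 h
      have hs : s < row0.length := by simp at h; omega
      rw [PySem.List.enumerate_cons]
      simp only [List.foldl_cons]
      have hcast : (s : Int) + 1 = ((s + 1 : Nat) : Int) := by push_cast; ring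
      rw [show PySem.List.pySetD row0 (s:Int) (f x) = row0.set s (f x) from PySem.List.pySetD_natCast ..]
      rw [hcast, ih (s+1) (row0.set s (f x)) (by simp at h ⊢; omega)]
      rw [List.set_eq_take_append_cons_drop]
      simp only [hs, if_pos]
      have hts : (row0.take s).length = s := by simp; omega
      have hA : (List.take s row0 ++ f x :: List.drop (s+1) row0).take (s+1)
          = List.take s row0 ++ [f x] := by
        rw [List.take_append, List.take_of_length_le (by omega)]
        congr 1
        rw [hts]
        simp [Nat.succ_sub (le_refl s)]
      have hB : (List.take s row0 ++ f x :: List.drop (s+1) row0).drop (s+1+l.length)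
          = row0.drop (s + (l.length+1)) := by
        rw [List.drop_append, List.drop_of_length_le (by omega), hts]
        have : s + 1 + l.length - s = l.length + 1 := by omega
        rw [this]
        simp [List.drop_drop]
        ring_nf
      rw [hA, hB]
      simp [List.map_cons]

lemma inner_collapse (F : Int × Int → Int) :
    ∀ (pairs : List (Int × Int)) (sg : List (List Int)) (j : Nat), j < sg.length →
      pairs.foldl
          (fun sg vv => PySem.List.pySetD sg (j : Int)
            (PySem.List.pySetD (PySem.List.pyGetD sg (j : Int) []) vv.1 (F vv))) sg
        = PySem.List.pySetD sg (j : Int)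
            (pairs.foldl (fun r vv => PySem.List.pySetD r vv.1 (F vv))
              (PySem.List.pyGetD sg (j : Int) [])) := by
  intro pairs
  induction pairs with
  | nil =>
      intro sg j hj
      simp only [List.foldl_nil]
      rw [PySem.List.pySetD_natCast, PySem.List.pyGetD_natCast,
          List.getD_eq_getElem _ _ hj, List.set_getElem_self]
  | cons vv pairs ih =>
      intro sg j hj
      simp only [List.foldl_cons]
      rw [ih _ j (by simp [PySem.List.pySetD_natCast, hj])]
      simp only [PySem.List.pySetD_natCast, PySem.List.pyGetD_natCast]
      rw [List.getD_eq_getElem sg _ hj]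
      have h2 : j < (sg.set j (PySem.List.pySetD sg[j] vv.1 (F vv))).length := by
        simpa using hj
      rw [List.getD_eq_getElem _ _ h2, List.getElem_set_self, List.set_set]

lemma fill_eq (graph : List (List Int)) (c : List Int) :
    (let component := PySem.List.sorted c (fun x => x) false
     let sub0 := (PySem.List.pyRange 0 (component.length : Int) 1).foldl
        (fun sg _ => sg ++
          [(PySem.List.pyRange 0 (component.length : Int) 1).foldl (fun r _ => r ++ [(0 : Int)]) []]) []
     (PySem.List.enumerate component 0).foldl
        (fun sg uu =>
          (PySem.List.enumerate component 0).foldl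
            (fun sg vv =>
              PySem.List.pySetD sg uu.1
                (PySem.List.pySetD (PySem.List.pyGetD sg uu.1 []) vv.1
                  (PySem.List.pyGetD (PySem.List.pyGetD graph uu.2 []) vv.2 0)))
            sg)
        sub0)
    = (PySem.List.sorted c (fun x => x) false).map (fun u =>
        (PySem.List.sorted c (fun x => x) false).map (fun w =>
          PySem.List.pyGetD (PySem.List.pyGetD graph u []) w 0)) := by
  set comp := PySem.List.sorted c (fun x => x) false with hcomp
  simp only []
  -- the all-zero matrix
  have hrow : (PySem.List.pyRange 0 (comp.length : Int) 1).foldl (fun r _ => r ++ [(0 : Int)]) []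
      = List.replicate comp.length 0 := by
    rw [foldl_const_append]
    simp [PySem.List.length_pyRange_one]
  have hsub0 : (PySem.List.pyRange 0 (comp.length : Int) 1).foldl
      (fun sg _ => sg ++ [(PySem.List.pyRange 0 (comp.length : Int) 1).foldl (fun r _ => r ++ [(0 : Int)]) []]) []
      = List.replicate comp.length (List.replicate comp.length 0) := by
    rw [hrow, foldl_const_append]
    simp [PySem.List.length_pyRange_one]
  rw [hsub0]
  -- stateful congruence: each outer step only replaces row uu.1 by the finished row
  have key := foldl_congr_inv
    (fun sg : List (List Int) => sg.length = comp.length ∧ ∀ row ∈ sg, row.length = comp.length)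
    (fun sg uu =>
      (PySem.List.enumerate comp 0).foldl
        (fun sg vv =>
          PySem.List.pySetD sg uu.1
            (PySem.List.pySetD (PySem.List.pyGetD sg uu.1 []) vv.1
              (PySem.List.pyGetD (PySem.List.pyGetD graph uu.2 []) vv.2 0)))
        sg)
    (fun sg uu => PySem.List.pySetD sg uu.1
      (comp.map (fun w => PySem.List.pyGetD (PySem.List.pyGetD graph uu.2 []) w 0)))
    (PySem.List.enumerate comp 0)
    (List.replicate comp.length (List.replicate comp.length 0))
    (by constructor <;> simp)
    ?_
  · rw [key.1]
    have := fold_set_enum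
      (fun u => comp.map (fun w => PySem.List.pyGetD (PySem.List.pyGetD graph u []) w 0))
      comp 0 (List.replicate comp.length (List.replicate comp.length 0)) (by simp)
    simpa using this
  · rintro sg uu ⟨hlen, hrows⟩ hmem
    obtain ⟨k, hk, rfl⟩ := (PySem.List.mem_enumerate_iff comp 0 uu).mp hmem
    simp only [zero_add]
    have hk' : k < sg.length := by omega
    constructor
    · rw [inner_collapse (fun vv => PySem.List.pyGetD (PySem.List.pyGetD graph comp[k] []) vv.2 0)
          (PySem.List.enumerate comp 0) sg k hk']
      congr 1
      have hr0 : PySem.List.pyGetD sg (k : Int) [] = sg[k] := by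
        rw [PySem.List.pyGetD_natCast, List.getD_eq_getElem _ _ hk']
      have hr0len : (PySem.List.pyGetD sg (k : Int) []).length = comp.length := by
        rw [hr0]; exact hrows _ (List.getElem_mem hk')
      have h3 := fold_set_enum
        (fun w => PySem.List.pyGetD (PySem.List.pyGetD graph comp[k] []) w 0)
        comp 0 (PySem.List.pyGetD sg (k : Int) []) (by omega)
      simp only [Nat.cast_zero, zero_add, List.take_zero, List.nil_append] at h3
      rw [List.drop_of_length_le (le_of_eq hr0len), List.append_nil] at h3
      exact h3
    · constructor
      · simpa using hlen
      · intro row hrow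
        rcases List.mem_or_eq_of_mem_set (by simpa [PySem.List.pySetD_natCast] using hrow) with h | h
        · exact hrows _ h
        · simp [h]

-- traversal equivalence -------------------------------------------------------

lemma foldQ (graph : List (List Int)) (hsq : ∀ row ∈ graph, row.length = graph.length) :
    ∀ c : Nat, ∀ l : List (Int × Int), (∀ p ∈ l, 0 ≤ p.1 ∧ p.1 < (graph.length : Int)) →
    ∀ s : List Int × List Bool, s.2.count false ≤ c → s.2.length = graph.length →
    ∀ f : Nat, c ≤ f →
      (l.foldl
        (fun s iw =>
          if iw.2 > 0 then
            if PySem.List.pyGetD s.2 iw.1 false = false then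
              DFSUtil graph f s.1 iw.1 s.2
            else s
          else s) s
        = l.foldl (gstep graph) s)
      ∧ (l.foldl (gstep graph) s).2.count false ≤ s.2.count false
      ∧ (l.foldl (gstep graph) s).2.length = graph.length := by
  intro c
  induction c using Nat.strong_induction_on with
  | _ c IH =>
  intro l
  induction l with
  | nil =>
      intro _ s _ hlen f _
      exact ⟨rfl, le_refl _, hlen⟩
  | cons iw l ihl =>
      intro hrng s hc hlen f hf
      obtain ⟨h0i, h1i⟩ := hrng iw (by simp)
      simp only [List.foldl_cons]
      by_cases hw : iw.2 > 0
      · by_cases hv : PySem.List.pyGetD s.2 iw.1 false = false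
        · -- visit iw.1
          have hi : iw.1.toNat < s.2.length := by rw [hlen]; omega
          have hgetE : s.2[iw.1.toNat] = false := by
            rwa [PySem.List.pyGetD_eq_getElem s.2 false h0i (by rw [hlen] at hi ⊢; omega)] at hv
          have hcf : 0 < s.2.count false :=
            List.count_pos_iff.mpr (hgetE ▸ List.getElem_mem hi)
          obtain ⟨f', rfl⟩ : ∃ f', f = f' + 1 := ⟨f - 1, by omega⟩
          -- the row of iw.1 and its enumeration
          have hrowmem : PySem.List.pyGetD graph iw.1 [] ∈ graph := by
            rw [PySem.List.pyGetD_eq_getElem graph [] h0i (by exact_mod_cast h1i)]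
            exact List.getElem_mem (by omega)
          have hrowlen : (PySem.List.pyGetD graph iw.1 []).length = graph.length :=
            hsq _ hrowmem
          have hrng' : ∀ p ∈ PySem.List.enumerate (PySem.List.pyGetD graph iw.1 []) 0,
              0 ≤ p.1 ∧ p.1 < (graph.length : Int) := by
            intro p hp
            obtain ⟨k, hk, rfl⟩ := (PySem.List.mem_enumerate_iff _ 0 p).mp hp
            rw [hrowlen] at hk
            constructor <;> simp <;> omega
          -- the state after marking
          have hs0len : (PySem.List.pySetD s.2 iw.1 true).length = graph.length := by
            rw [PySem.List.pySetD_of_nonneg _ _ h0i]; simp [hlen]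
          have hs0cnt : (PySem.List.pySetD s.2 iw.1 true).count false + 1 = s.2.count false := by
            rw [PySem.List.pySetD_of_nonneg _ _ h0i]
            exact count_false_set_true s.2 iw.1.toNat hi hgetE
          have hcnt' : List.count false (s.1 ++ [iw.1], PySem.List.pySetD s.2 iw.1 true).2
              ≤ s.2.count false - 1 := by
            show List.count false (PySem.List.pySetD s.2 iw.1 true) ≤ _
            omega
          have hstep := IH (s.2.count false - 1) (by omega) _ hrng'
            (s.1 ++ [iw.1], PySem.List.pySetD s.2 iw.1 true) hcnt' hs0len f' (by omega)
          have hstep2 := IH (s.2.count false - 1) (by omega) _ hrng'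
            (s.1 ++ [iw.1], PySem.List.pySetD s.2 iw.1 true) hcnt' hs0len
            (s.2.count false - 1) (le_refl _)
          -- both branches step to the same state s1
          have hA : (if iw.2 > 0 then
              if PySem.List.pyGetD s.2 iw.1 false = false then
                DFSUtil graph (f'+1) s.1 iw.1 s.2 else s else s)
              = (PySem.List.enumerate (PySem.List.pyGetD graph iw.1 []) 0).foldl (gstep graph)
                  (s.1 ++ [iw.1], PySem.List.pySetD s.2 iw.1 true) := by
            rw [if_pos hw, if_pos hv]
            show (PySem.List.enumerate (PySem.List.pyGetD graph iw.1 []) 0).foldl _ _ = _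
            exact hstep.1
          have hB : gstep graph s iw
              = (PySem.List.enumerate (PySem.List.pyGetD graph iw.1 []) 0).foldl (gstep graph)
                  (s.1 ++ [iw.1], PySem.List.pySetD s.2 iw.1 true) := by
            unfold gstep dfsStep
            rw [if_pos hw, if_neg (by simp [hv])]
            obtain ⟨cf', hcf'⟩ : ∃ cf', s.2.count false = cf' + 1 := ⟨s.2.count false - 1, by omega⟩
            rw [hcf']
            show (PySem.List.enumerate (PySem.List.pyGetD graph iw.1 []) 0).foldl _ _ = _
            have := hstep2.1
            rw [show s.2.count false - 1 = cf' by omega] at this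
            exact this
          rw [hA, hB]
          have hcont := ihl (fun p hp => hrng p (by simp [hp]))
            ((PySem.List.enumerate (PySem.List.pyGetD graph iw.1 []) 0).foldl (gstep graph)
              (s.1 ++ [iw.1], PySem.List.pySetD s.2 iw.1 true))
            (by have h1 : List.count false ((PySem.List.enumerate (PySem.List.pyGetD graph iw.1 []) 0).foldl
                  (gstep graph) (s.1 ++ [iw.1], PySem.List.pySetD s.2 iw.1 true)).2
                  ≤ List.count false (PySem.List.pySetD s.2 iw.1 true) := hstep.2.1
                omega) hstep.2.2 (f'+1) hf
          refine ⟨hcont.1, ?_, hcont.2.2⟩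
          have h1 : List.count false ((PySem.List.enumerate (PySem.List.pyGetD graph iw.1 []) 0).foldl
              (gstep graph) (s.1 ++ [iw.1], PySem.List.pySetD s.2 iw.1 true)).2
              ≤ List.count false (PySem.List.pySetD s.2 iw.1 true) := hstep.2.1
          have h2 := hcont.2.1
          omega
        · -- neighbour already visited: both skip
          have hgs : gstep graph s iw = s := by
            unfold gstep dfsStep
            rw [if_pos hw, if_pos (by simpa using hv)]
          rw [if_pos hw, if_neg hv, hgs]
          exact ihl (fun p hp => hrng p (by simp [hp])) s hc hlen f hf
      · have hgs : gstep graph s iw = s := by unfold gstep; rw [if_neg hw]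
        rw [if_neg hw, hgs]
        exact ihl (fun p hp => hrng p (by simp [hp])) s hc hlen f hf

lemma stackDFS_nil (graph : List (List Int)) (f : Nat) (t : List Int) (vis : List Bool) :
    stackDFS graph f [] t vis = (t, vis) := by
  cases f <;> rfl

lemma foldl_gstep_filterMap (graph : List (List Int)) :
    ∀ (l : List (Int × Int)) (s : List Int × List Bool),
      (l.filterMap (fun iw => if iw.2 > 0 then some iw.1 else none)).foldl (dfsStep graph) s
        = l.foldl (gstep graph) s := by
  intro l
  induction l with
  | nil => intro s; rfl
  | cons iw l ih =>
      intro s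
      by_cases hw : iw.2 > 0 <;> simp [List.filterMap_cons, hw, ih, gstep]

lemma dfs_canonical (graph : List (List Int)) (hsq : ∀ row ∈ graph, row.length = graph.length)
    (vis : List Bool) (temp : List Int) (v : Int) (f : Nat)
    (hlen : vis.length = graph.length) (h0 : 0 ≤ v) (h1 : v < (graph.length : Int))
    (hv : PySem.List.pyGetD vis v false = false) (hf : vis.count false ≤ f) :
    DFSUtil graph f temp v vis = dfsStep graph (temp, vis) v
    ∧ (DFSUtil graph f temp v vis).2.count false < vis.count false
    ∧ (DFSUtil graph f temp v vis).2.length = graph.length := by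
  have hi : v.toNat < vis.length := by rw [hlen]; omega
  have hgetE : vis[v.toNat] = false := by
    rwa [PySem.List.pyGetD_eq_getElem vis false h0 (by rw [hlen] at hi ⊢; omega)] at hv
  have hcf : 0 < vis.count false := List.count_pos_iff.mpr (hgetE ▸ List.getElem_mem hi)
  obtain ⟨f', rfl⟩ : ∃ f', f = f' + 1 := ⟨f - 1, by omega⟩
  have hrowmem : PySem.List.pyGetD graph v [] ∈ graph := by
    rw [PySem.List.pyGetD_eq_getElem graph [] h0 (by exact_mod_cast h1)]
    exact List.getElem_mem (by omega)
  have hrowlen : (PySem.List.pyGetD graph v []).length = graph.length := hsq _ hrowmem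
  have hrng' : ∀ p ∈ PySem.List.enumerate (PySem.List.pyGetD graph v []) 0,
      0 ≤ p.1 ∧ p.1 < (graph.length : Int) := by
    intro p hp
    obtain ⟨k, hk, rfl⟩ := (PySem.List.mem_enumerate_iff _ 0 p).mp hp
    rw [hrowlen] at hk
    constructor <;> simp <;> omega
  have hs0len : (PySem.List.pySetD vis v true).length = graph.length := by
    rw [PySem.List.pySetD_of_nonneg _ _ h0]; simp [hlen]
  have hs0cnt : (PySem.List.pySetD vis v true).count false + 1 = vis.count false := by
    rw [PySem.List.pySetD_of_nonneg _ _ h0]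
    exact count_false_set_true vis v.toNat hi hgetE
  have hcnt' : List.count false (temp ++ [v], PySem.List.pySetD vis v true).2
      ≤ vis.count false - 1 := by
    show List.count false (PySem.List.pySetD vis v true) ≤ _
    omega
  have hstep := foldQ graph hsq (vis.count false - 1) _ hrng'
    (temp ++ [v], PySem.List.pySetD vis v true) hcnt' hs0len f' (by omega)
  have hstep2 := foldQ graph hsq (vis.count false - 1) _ hrng'
    (temp ++ [v], PySem.List.pySetD vis v true) hcnt' hs0len (vis.count false - 1) (le_refl _)
  have hA : DFSUtil graph (f'+1) temp v vis
      = (PySem.List.enumerate (PySem.List.pyGetD graph v []) 0).foldl (gstep graph)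
          (temp ++ [v], PySem.List.pySetD vis v true) := by
    show (PySem.List.enumerate (PySem.List.pyGetD graph v []) 0).foldl _ _ = _
    exact hstep.1
  have hB : dfsStep graph (temp, vis) v
      = (PySem.List.enumerate (PySem.List.pyGetD graph v []) 0).foldl (gstep graph)
          (temp ++ [v], PySem.List.pySetD vis v true) := by
    unfold dfsStep
    rw [if_neg (by simp [hv])]
    obtain ⟨cf', hcf'⟩ : ∃ cf', (temp, vis).2.count false = cf' + 1 :=
      ⟨vis.count false - 1, by show vis.count false = _; omega⟩
    rw [hcf']
    show (PySem.List.enumerate (PySem.List.pyGetD graph v []) 0).foldl _ _ = _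
    have := hstep2.1
    rw [show vis.count false - 1 = cf' from by
      have : (temp, vis).2.count false = vis.count false := rfl
      omega] at this
    exact this
  have h1' : List.count false ((PySem.List.enumerate (PySem.List.pyGetD graph v []) 0).foldl
      (gstep graph) (temp ++ [v], PySem.List.pySetD vis v true)).2
      ≤ List.count false (PySem.List.pySetD vis v true) := hstep.2.1
  refine ⟨hA.trans hB.symm, ?_, ?_⟩
  · rw [hA]; omega
  · rw [hA]; exact hstep.2.2

lemma stack_eq (graph : List (List Int)) (hsq : ∀ row ∈ graph, row.length = graph.length) :
    ∀ c : Nat, ∀ st : List Int, ∀ (vis : List Bool) (temp : List Int) (f2 : Nat),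
      vis.count false = c → vis.length = graph.length →
      (∀ x ∈ st, 0 ≤ x ∧ x < (graph.length : Int)) →
      st.length + (graph.length + 1) * c ≤ f2 →
      stackDFS graph f2 st temp vis = st.foldl (dfsStep graph) (temp, vis) := by
  intro c
  induction c using Nat.strong_induction_on with
  | _ c IH =>
  intro st
  induction st with
  | nil =>
      intro vis temp f2 _ _ _ _
      rw [stackDFS_nil]; rfl
  | cons v st ihst =>
      intro vis temp f2 hc hlen hrng hf2
      obtain ⟨h0, h1⟩ := hrng v (by simp)
      obtain ⟨f2', rfl⟩ : ∃ f2', f2 = f2' + 1 := ⟨f2 - 1, by simp at hf2; omega⟩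
      show (if PySem.List.pyGetD vis v false then stackDFS graph f2' st temp vis
            else stackDFS graph f2'
              (((PySem.List.enumerate (PySem.List.pyGetD graph v []) 0).filterMap
                  (fun iw => if iw.2 > 0 then some iw.1 else none)) ++ st)
              (temp ++ [v]) (PySem.List.pySetD vis v true)) = _
      by_cases hv : PySem.List.pyGetD vis v false = false
      · rw [if_neg (by simp [hv])]
        -- visit v
        have hi : v.toNat < vis.length := by rw [hlen]; omega
        have hgetE : vis[v.toNat] = false := by
          rwa [PySem.List.pyGetD_eq_getElem vis false h0 (by rw [hlen] at hi ⊢; omega)] at hv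
        have hcf : 0 < vis.count false := List.count_pos_iff.mpr (hgetE ▸ List.getElem_mem hi)
        have hrowmem : PySem.List.pyGetD graph v [] ∈ graph := by
          rw [PySem.List.pyGetD_eq_getElem graph [] h0 (by exact_mod_cast h1)]
          exact List.getElem_mem (by omega)
        have hrowlen : (PySem.List.pyGetD graph v []).length = graph.length := hsq _ hrowmem
        have hnslen : ((PySem.List.enumerate (PySem.List.pyGetD graph v []) 0).filterMap
            (fun iw => if iw.2 > 0 then some iw.1 else none)).length ≤ graph.length := by
          calc _ ≤ (PySem.List.enumerate (PySem.List.pyGetD graph v []) 0).length :=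
                List.length_filterMap_le _ _
            _ = graph.length := by rw [PySem.List.length_enumerate, hrowlen]
        have hnsrng : ∀ x ∈ (PySem.List.enumerate (PySem.List.pyGetD graph v []) 0).filterMap
            (fun iw => if iw.2 > 0 then some iw.1 else none), 0 ≤ x ∧ x < (graph.length : Int) := by
          intro x hx
          obtain ⟨p, hp, hpx⟩ := List.mem_filterMap.mp hx
          obtain ⟨k, hk, rfl⟩ := (PySem.List.mem_enumerate_iff _ 0 p).mp hp
          rw [hrowlen] at hk
          rcases ite_eq_iff.mp hpx with ⟨hw, hsome⟩ | ⟨_, hnone⟩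
          · obtain rfl := Option.some.inj hsome
            constructor
            · simp
            · simp only [zero_add]
              exact_mod_cast hk
          · exact absurd hnone (by simp)
        have hs0len : (PySem.List.pySetD vis v true).length = graph.length := by
          rw [PySem.List.pySetD_of_nonneg _ _ h0]; simp [hlen]
        have hs0cnt : (PySem.List.pySetD vis v true).count false + 1 = vis.count false := by
          rw [PySem.List.pySetD_of_nonneg _ _ h0]
          exact count_false_set_true vis v.toNat hi hgetE
        rw [IH (c - 1) (by omega) _ _ _ _ (by omega) hs0len
          (by intro x hx
              rcases List.mem_append.mp hx with h | h
              · exact hnsrng x h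
              · exact hrng x (by simp [h]))
          (by have hc1 : 1 ≤ c := by omega
              have hmul : (graph.length + 1) * c = (graph.length + 1) * (c - 1) + (graph.length + 1) := by
                conv_lhs => rw [← Nat.sub_add_cancel hc1]
                ring
              simp only [List.length_append, List.length_cons] at hf2 ⊢
              omega)]
        rw [List.foldl_append]
        rw [foldl_gstep_filterMap]
        -- the head visit equals dfsStep
        have hdfs := dfs_canonical graph hsq vis temp v (vis.count false) hlen h0 h1 hv (le_refl _)
        have hB : dfsStep graph (temp, vis) v
            = (PySem.List.enumerate (PySem.List.pyGetD graph v []) 0).foldl (gstep graph)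
                (temp ++ [v], PySem.List.pySetD vis v true) := by
          rw [← hdfs.1]
          obtain ⟨cf', hcf'⟩ : ∃ cf', vis.count false = cf' + 1 := ⟨vis.count false - 1, by omega⟩
          rw [hcf']
          show (PySem.List.enumerate (PySem.List.pyGetD graph v []) 0).foldl _ _ = _
          have hstep2 := foldQ graph hsq cf'
            (PySem.List.enumerate (PySem.List.pyGetD graph v []) 0)
            (by intro p hp
                obtain ⟨k, hk, rfl⟩ := (PySem.List.mem_enumerate_iff _ 0 p).mp hp
                rw [hrowlen] at hk
                constructor <;> simp <;> omega)
            (temp ++ [v], PySem.List.pySetD vis v true)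
            (by show List.count false (PySem.List.pySetD vis v true) ≤ _; omega) hs0len
            cf' (le_refl _)
          exact hstep2.1
        rw [List.foldl_cons, ← hB]
      · rw [if_pos (by simpa using hv)]
        have : dfsStep graph (temp, vis) v = (temp, vis) := by
          unfold dfsStep; rw [if_pos (by simpa using hv)]
        rw [List.foldl_cons, this]
        exact ihst vis temp f2' hc hlen (fun x hx => hrng x (by simp [hx])) (by simp at hf2; omega)

lemma loop_eq (graph : List (List Int)) (hsq : ∀ row ∈ graph, row.length = graph.length) :
    ∀ r : List Int, (∀ v ∈ r, 0 ≤ v ∧ v < (graph.length : Int)) →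
    ∀ (accA : List (List Int)) (vis : List Bool), vis.length = graph.length →
      r.foldl (stepB graph) (accA.map (transB graph), vis)
        = (((r.foldl (stepA graph) (accA, vis)).1).map (transB graph),
           (r.foldl (stepA graph) (accA, vis)).2) := by
  intro r
  induction r with
  | nil => intro _ accA vis _; rfl
  | cons v r ih =>
      intro hrng accA vis hlen
      obtain ⟨h0, h1⟩ := hrng v (by simp)
      simp only [List.foldl_cons]
      by_cases hv : PySem.List.pyGetD vis v false = false
      · have hdfs := dfs_canonical graph hsq vis [] v (graph.length + 1) hlen h0 h1 hv
          (le_trans (List.count_le_length) (by omega))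
        have hstk : stackDFS graph (graph.length * graph.length + graph.length + 1) [v] [] vis
            = DFSUtil graph (graph.length + 1) [] v vis := by
          rw [stack_eq graph hsq (vis.count false) [v] vis [] _ rfl hlen
            (by intro x hx; simp at hx; subst hx; exact ⟨h0, h1⟩)
            (by have := Nat.mul_le_mul_left (graph.length + 1)
                  (le_trans (List.count_le_length (a := false) (l := vis)) (le_of_eq hlen))
                simp only [List.length_cons, List.length_nil]
                nlinarith)]
          simp only [List.foldl_cons, List.foldl_nil]
          exact hdfs.1.symm
        have hA : stepA graph (accA, vis) v
            = (accA ++ [(DFSUtil graph (graph.length + 1) [] v vis).1],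
               (DFSUtil graph (graph.length + 1) [] v vis).2) := by
          unfold stepA; rw [if_pos hv]
        have hB : stepB graph (accA.map (transB graph), vis) v
            = ((accA.map (transB graph)) ++ [transB graph (DFSUtil graph (graph.length + 1) [] v vis).1],
               (DFSUtil graph (graph.length + 1) [] v vis).2) := by
          unfold stepB; rw [if_neg (by simp [hv])]
          show (_ ++ [transB graph (stackDFS graph _ [v] [] vis).1], (stackDFS graph _ [v] [] vis).2) = _
          rw [hstk]
        rw [hA, hB]
        have := ih (fun x hx => hrng x (by simp [hx]))
          (accA ++ [(DFSUtil graph (graph.length + 1) [] v vis).1])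
          (DFSUtil graph (graph.length + 1) [] v vis).2 hdfs.2.2
        rw [← this]
        simp [List.map_append]
      · have hA : stepA graph (accA, vis) v = (accA, vis) := by
          unfold stepA; rw [if_neg hv]
        have hB : stepB graph (accA.map (transB graph), vis) v = (accA.map (transB graph), vis) := by
          unfold stepB; rw [if_pos (by simpa using hv)]
        rw [hA, hB]
        exact ih (fun x hx => hrng x (by simp [hx])) accA vis hlen

lemma A_tail (graph : List (List Int)) :
    ∀ (cs : List (List Int)) (acc : List ((List (Int × Int)) × List (List Int))),
      cs.foldl
        (fun acc c =>
          let component := PySem.List.sorted c (fun x => x) false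
          let map := PySem.List.enumerate component 0
          let sub0 := (PySem.List.pyRange 0 (component.length : Int) 1).foldl
              (fun sg _ => sg ++
                [(PySem.List.pyRange 0 (component.length : Int) 1).foldl (fun r _ => r ++ [(0 : Int)]) []]) []
          let sub := (PySem.List.enumerate component 0).foldl
              (fun sg uu =>
                (PySem.List.enumerate component 0).foldl
                  (fun sg vv =>
                    PySem.List.pySetD sg uu.1
                      (PySem.List.pySetD (PySem.List.pyGetD sg uu.1 []) vv.1
                        (PySem.List.pyGetD (PySem.List.pyGetD graph uu.2 []) vv.2 0)))
                  sg)
              sub0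
          acc ++ [(map, sub)]) acc
      = acc ++ cs.map (transB graph) := by
  intro cs
  induction cs with
  | nil => intro acc; simp
  | cons c cs ih =>
      intro acc
      simp only [List.foldl_cons, List.map_cons]
      rw [ih]
      have hstep : (PySem.List.enumerate (PySem.List.sorted c (fun x => x) false) 0,
          (let component := PySem.List.sorted c (fun x => x) false
           let sub0 := (PySem.List.pyRange 0 (component.length : Int) 1).foldl
              (fun sg _ => sg ++
                [(PySem.List.pyRange 0 (component.length : Int) 1).foldl (fun r _ => r ++ [(0 : Int)]) []]) []
           (PySem.List.enumerate component 0).foldl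
              (fun sg uu =>
                (PySem.List.enumerate component 0).foldl
                  (fun sg vv =>
                    PySem.List.pySetD sg uu.1
                      (PySem.List.pySetD (PySem.List.pyGetD sg uu.1 []) vv.1
                        (PySem.List.pyGetD (PySem.List.pyGetD graph uu.2 []) vv.2 0)))
                  sg)
              sub0))
          = transB graph c := by
        rw [fill_eq graph c]
        rfl
      rw [← hstep]
      simp [List.append_assoc]

lemma subGraphs_eq (graph : List (List Int))
    (hsq : ∀ row ∈ graph, row.length = graph.length) :
    subGraphs graph = subGraphs_alt graph := by
  have hvis : (PySem.List.pyRange 0 (graph.length : Int) 1).foldl (fun vs _ => vs ++ [false]) []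
      = List.replicate graph.length false := by
    rw [foldl_const_append]
    simp [PySem.List.length_pyRange_one]
  have hcc : connectedComponents graph
      = ((PySem.List.pyRange 0 (graph.length : Int) 1).foldl (stepA graph)
          ([], List.replicate graph.length false)).1 := by
    unfold connectedComponents stepA
    rw [hvis]
  have halt : subGraphs_alt graph
      = ((PySem.List.pyRange 0 (graph.length : Int) 1).foldl (stepB graph)
          ([], List.replicate graph.length false)).1 := rfl
  have hrng : ∀ v ∈ PySem.List.pyRange 0 (graph.length : Int) 1,
      0 ≤ v ∧ v < (graph.length : Int) := by
    intro v hv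
    have := PySem.List.mem_pyRange_one.mp hv
    omega
  have hloop := loop_eq graph hsq (PySem.List.pyRange 0 (graph.length : Int) 1) hrng
    [] (List.replicate graph.length false) (by simp)
  have hA : subGraphs graph = (connectedComponents graph).map (transB graph) := by
    unfold subGraphs
    rw [A_tail]
    simp
  rw [hA, halt, hcc]
  have : ([] : List ((List (Int × Int)) × List (List Int)))
      = ([] : List (List Int)).map (transB graph) := rfl
  have hempty : (([] : List ((List (Int × Int)) × List (List Int))), List.replicate graph.length false)
      = ((([] : List (List Int)).map (transB graph)), List.replicate graph.length false) := rfl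
  rw [hempty, hloop]

-- ===== VERDICT (by name: the statement is the Claim_ definition above) =====
theorem subGraphs_spec : Claim_equal_subGraphs := by
  intro graph _hdom hpre
  unfold Spec_subGraphs
  unfold Pre_subGraphs at hpre
  exact subGraphs_eq graph hpre
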